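-- pv_equiv track=rewrite | github.com/ricekot/learning | advent-of-code-2025/day05/solution.py | part2
-- ===== SOURCE A (Python) =====
-- def part2(ranges: list[tuple[int, int]]) -> int:
--     sorted_ranges = sorted(ranges, key=lambda r: r[0])
--     i = 0
--     while i < len(sorted_ranges) - 1:
--         if sorted_ranges[i][1] >= sorted_ranges[i + 1][0]:
--             new_range = (
--                 sorted_ranges[i][0],
--                 max(sorted_ranges[i][1], sorted_ranges[i + 1][1]),
--             )
--             del sorted_ranges[i : i + 2]
--             sorted_ranges.insert(i, new_range)
--         else:
--             i += 1
--
--     result = 0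
--     for r in sorted_ranges:
--         result += r[1] - r[0] + 1
--     return result
-- ===== SOURCE B (Python) =====
-- def part2(ranges):
--     total = 0
--     cur = None  # current merged interval (start, end), or None
--     for r in sorted(ranges, key=lambda r: r[0]):
--         s, e = r[0], r[1]
--         if cur is None:
--             cur = (s, e)
--         elif cur[1] >= s:
--             cur = (cur[0], max(cur[1], e))
--         else:
--             total += cur[1] - cur[0] + 1
--             cur = (s, e)
--     if cur is not None:
--         total += cur[1] - cur[0] + 1
--     return total
-- ===== Notes on version B (the rewrite author's own statement) =====
-- stated objective: alternative
-- what changed: Replaces the quadratic while-loop that repeatedly deletes/re-inserts into the sorted list with a single linear merging pass keeping one current interval and a running total.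
import Mathlib
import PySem

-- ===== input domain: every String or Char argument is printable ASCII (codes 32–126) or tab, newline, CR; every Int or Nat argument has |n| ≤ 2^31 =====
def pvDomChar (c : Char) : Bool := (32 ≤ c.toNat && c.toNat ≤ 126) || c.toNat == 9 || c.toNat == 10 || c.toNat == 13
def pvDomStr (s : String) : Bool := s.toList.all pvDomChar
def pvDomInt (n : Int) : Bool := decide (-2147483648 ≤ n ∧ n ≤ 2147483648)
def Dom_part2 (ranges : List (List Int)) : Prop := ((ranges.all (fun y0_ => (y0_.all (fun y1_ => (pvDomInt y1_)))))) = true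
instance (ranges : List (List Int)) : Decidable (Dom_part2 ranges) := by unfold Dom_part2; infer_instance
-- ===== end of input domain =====

-- B replaces A's delete/re-insert while-loop with a single merging pass over the sorted list (alternative algorithm).

-- ===== PORT A =====
-- the while loop: i only moves forward, or the list shrinks by one (del xs[i:i+2]; insert).
-- Fuel only makes the recursion structural: xs.length - i drops by ≥ 1 per step, so
-- fuel = initial list length never runs out before the loop guard fails.
-- Indexing xs[i], xs[i+1] is exact here via getD: the loop guard keeps both in range.
def part2Loop (fuel : Nat) (xs : List (List Int)) (i : Nat) : List (List Int) :=
  match fuel with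
  | 0 => xs
  | fuel + 1 =>
    if i + 1 < xs.length then
      let a := xs.getD i []
      let b := xs.getD (i + 1) []
      if a.getD 1 0 ≥ b.getD 0 0 then
        -- del sorted_ranges[i:i+2]; insert(i, new_range)
        part2Loop fuel (xs.take i ++ [[a.getD 0 0, max (a.getD 1 0) (b.getD 1 0)]] ++ xs.drop (i + 2)) i
      else
        part2Loop fuel xs (i + 1)
    else xs

def part2 (ranges : List (List Int)) : Int :=
  let sorted_ranges := PySem.List.sorted ranges (fun r => r.getD 0 0)
  let final := part2Loop sorted_ranges.length sorted_ranges 0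
  final.foldl (fun result r => result + (r.getD 1 0 - r.getD 0 0 + 1)) 0

-- ===== PORT B =====
-- one pass over the sorted list; state = (running total, current merged interval or none)
def part2AltStep (st : Int × Option (Int × Int)) (r : List Int) : Int × Option (Int × Int) :=
  let s := r.getD 0 0
  let e := r.getD 1 0
  match st.2 with
  | none => (st.1, some (s, e))
  | some c =>
    if c.2 ≥ s then (st.1, some (c.1, max c.2 e))
    else (st.1 + (c.2 - c.1 + 1), some (s, e))

def part2_alt (ranges : List (List Int)) : Int :=
  let st := (PySem.List.sorted ranges (fun r => r.getD 0 0)).foldl part2AltStep (0, none)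
  match st.2 with
  | none => st.1
  | some c => st.1 + (c.2 - c.1 + 1)

-- ===== PRECONDITION & SPEC =====
-- Pre_: every interval has at least two entries; on shorter elements Python A raises IndexError (r[0] or r[1]).
def Pre_part2 (ranges : List (List Int)) : Prop := ∀ r ∈ ranges, 2 ≤ r.length
instance (ranges : List (List Int)) : Decidable (Pre_part2 ranges) := by unfold Pre_part2; infer_instance
def pvWitness_part2 : List (List Int) := [[1, 3], [2, 5], [9, 9]]

def Spec_part2 (ranges : List (List Int)) (out : Int) : Prop := out = part2_alt ranges
instance (ranges : List (List Int)) (out : Int) : Decidable (Spec_part2 ranges out) := by unfold Spec_part2; infer_instance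

-- ===== CLAIM (what is proved, stated in full; the proofs are below) =====
def Claim_equal_part2 : Prop := ∀ (ranges : List (List Int)), Dom_part2 ranges → Pre_part2 ranges → Spec_part2 ranges (part2 ranges)

-- ===== LEMMAS AND PROOFS =====

-- A's loop at index i+1 leaves the head untouched
theorem part2Loop_shift : ∀ (fuel : Nat) (xs : List (List Int)) (a : List Int) (i : Nat),
    part2Loop fuel (a :: xs) (i + 1) = a :: part2Loop fuel xs i := by
  intro fuel
  induction fuel with
  | zero => intro xs a i; rfl
  | succ fuel ih =>
    intro xs a i
    show (if i + 1 + 1 < (a :: xs).length then _ else _) = a :: (if i + 1 < xs.length then _ else _)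
    by_cases hg : i + 1 < xs.length
    · have hg' : i + 1 + 1 < (a :: xs).length := by simp; omega
      rw [if_pos hg, if_pos hg']
      simp only [List.getD_cons_succ]
      by_cases hm : (xs.getD i []).getD 1 0 ≥ (xs.getD (i + 1) []).getD 0 0
      · rw [if_pos hm, if_pos hm]
        have htake : (a :: xs).take (i + 1) = a :: xs.take i := rfl
        have hdrop : (a :: xs).drop (i + 1 + 2) = xs.drop (i + 2) := rfl
        rw [htake, hdrop]
        exact ih _ a i
      · rw [if_neg hm, if_neg hm]
        exact ih xs a (i + 1)
    · have hg' : ¬ (i + 1 + 1 < (a :: xs).length) := by simp; omega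
      rw [if_neg hg, if_neg hg']

-- B's fold with a live interval computes A's sum over the merged list
theorem fold_eq_sum : ∀ (fuel : Nat) (xs : List (List Int)), xs.length < fuel →
    ∀ (h : List Int) (t : Int),
    (let st := xs.foldl part2AltStep (t, some (h.getD 0 0, h.getD 1 0))
     match st.2 with
     | none => st.1
     | some c => st.1 + (c.2 - c.1 + 1)) =
    (part2Loop fuel (h :: xs) 0).foldl (fun result r => result + (r.getD 1 0 - r.getD 0 0 + 1)) t := by
  intro fuel
  induction fuel with
  | zero => intro xs hlen h t; omega
  | succ fuel ih =>
    intro xs hlen h t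
    match xs with
    | [] =>
      show t + (h.getD 1 0 - h.getD 0 0 + 1) =
        (part2Loop (fuel + 1) [h] 0).foldl (fun result r => result + (r.getD 1 0 - r.getD 0 0 + 1)) t
      have : part2Loop (fuel + 1) [h] 0 = [h] := by
        show (if 0 + 1 < [h].length then _ else _) = [h]
        rw [if_neg (by simp)]
      rw [this]
      rfl
    | y :: ys =>
      have hstep : part2Loop (fuel + 1) (h :: y :: ys) 0 =
          if h.getD 1 0 ≥ y.getD 0 0 then
            part2Loop fuel ([h.getD 0 0, max (h.getD 1 0) (y.getD 1 0)] :: ys) 0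
          else h :: part2Loop fuel (y :: ys) 0 := by
        show (if 0 + 1 < (h :: y :: ys).length then _ else _) = _
        rw [if_pos (by simp)]
        simp only [List.getD_cons_zero, List.getD_cons_succ]
        by_cases hm : h.getD 1 0 ≥ y.getD 0 0
        · rw [if_pos hm, if_pos hm]; rfl
        · rw [if_neg hm, if_neg hm]
          exact part2Loop_shift fuel (y :: ys) h 0
      rw [hstep]
      simp only [List.foldl_cons]
      by_cases hm : h.getD 1 0 ≥ y.getD 0 0
      · have hs : part2AltStep (t, some (h.getD 0 0, h.getD 1 0)) y
            = (t, some (h.getD 0 0, max (h.getD 1 0) (y.getD 1 0))) := by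
          simp only [part2AltStep]
          rw [if_pos hm]
        rw [hs, if_pos hm]
        have := ih ys (by simp at hlen; omega)
          [h.getD 0 0, max (h.getD 1 0) (y.getD 1 0)] t
        simpa using this
      · have hs : part2AltStep (t, some (h.getD 0 0, h.getD 1 0)) y
            = (t + (h.getD 1 0 - h.getD 0 0 + 1), some (y.getD 0 0, y.getD 1 0)) := by
          simp only [part2AltStep]
          rw [if_neg hm]
        rw [hs, if_neg hm]
        simp only [List.foldl_cons]
        exact ih ys (by simp at hlen; omega) y (t + (h.getD 1 0 - h.getD 0 0 + 1))

-- ===== VERDICT (by name: the statement is the Claim_ definition above) =====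
theorem part2_spec : Claim_equal_part2 := by
  intro ranges _ _
  unfold Spec_part2 part2 part2_alt
  generalize PySem.List.sorted ranges (fun r => r.getD 0 0) = S
  match S with
  | [] => rfl
  | h :: xs =>
    dsimp only
    simp only [List.foldl_cons]
    have hstep : part2AltStep (0, none) h = (0, some (h.getD 0 0, h.getD 1 0)) := rfl
    rw [hstep]
    exact (fold_eq_sum (xs.length + 1) xs (by omega) h 0).symm
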